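-- pv_equiv track=rewrite | github.com/firsthousesVn/glauka.1 | core/nuclei.py | summarize_nuclei_output
-- ===== SOURCE A (Python) =====
-- def summarize_nuclei_output(text: str) -> str:
--     """
--     Rough severity summary from nuclei output lines.
--     Looks for [info], [low], [medium], [high], [critical].
--     """
--     if not text:
--         return "Nuclei: no output."
--
--     counts = {
--         "info": 0,
--         "low": 0,
--         "medium": 0,
--         "high": 0,
--         "critical": 0,
--     }
--
--     for line in text.splitlines():
--         lowered = line.lower()
--         for sev in counts.keys():
--             token = f"[{sev}]"
--             if token in lowered:
--                 counts[sev] += 1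
--
--     total = sum(counts.values())
--     if total == 0:
--         return "Nuclei: no findings at selected severities."
--
--     parts = [f"{sev.capitalize()}={count}" for sev, count in counts.items() if count > 0]
--     return "Nuclei Findings: " + ", ".join(parts)
-- ===== SOURCE B (Python) =====
-- def summarize_nuclei_output(text: str) -> str:
--     if not text:
--         return "Nuclei: no output."
--
--     def bracket_tokens(line):
--         # single-pass state machine: collect characters between '[' and ']'
--         toks = set()
--         buf = None
--         for ch in line.lower():
--             if ch == '[':
--                 buf = []
--             elif ch == ']':
--                 if buf is not None:
--                     toks.add(''.join(buf))
--                     buf = None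
--             elif buf is not None:
--                 buf.append(ch)
--         return toks
--
--     token_sets = [bracket_tokens(line) for line in text.splitlines()]
--     counts = [(sev, sum(1 for toks in token_sets if sev in toks))
--               for sev in ("info", "low", "medium", "high", "critical")]
--     if all(n == 0 for _, n in counts):
--         return "Nuclei: no findings at selected severities."
--     parts = [f"{sev.capitalize()}={n}" for sev, n in counts if n > 0]
--     return "Nuclei Findings: " + ", ".join(parts)
-- ===== Notes on version B (the rewrite author's own statement) =====
-- stated objective: alternative
-- what changed: A tests five severity substrings against each lowercased line and accumulates a mutable dict; B runs a single-pass bracket-tokenizer state machine over each line, collects the set of bracketed tokens, and counts lines whose token set contains each severity.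
import Mathlib
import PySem

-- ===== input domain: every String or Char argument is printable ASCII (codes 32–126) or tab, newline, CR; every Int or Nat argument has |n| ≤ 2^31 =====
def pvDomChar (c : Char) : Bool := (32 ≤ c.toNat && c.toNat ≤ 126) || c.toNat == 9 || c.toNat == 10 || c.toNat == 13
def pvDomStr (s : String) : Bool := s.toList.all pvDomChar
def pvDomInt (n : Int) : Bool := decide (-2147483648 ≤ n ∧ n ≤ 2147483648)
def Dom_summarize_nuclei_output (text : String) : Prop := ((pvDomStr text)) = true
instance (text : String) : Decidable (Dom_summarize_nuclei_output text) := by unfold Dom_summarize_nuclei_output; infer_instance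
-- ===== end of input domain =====

-- B replaces A's five-substring-searches-per-line with a single-pass bracket-tokenizer state machine
-- per line, then counts the lines whose token set holds each severity (alternative algorithm, same cost).

-- Python str.capitalize, exact here: it is only ever applied to the lowercase ASCII severity literals
def pyCapitalize (s : String) : String :=
  match s.toList with
  | [] => ""
  | c :: rest => String.ofList (PySem.Chars.upperChar c :: PySem.Chars.lower rest)

def sevList : List String := ["info", "low", "medium", "high", "critical"]

-- ===== PORT A =====
def summarize_nuclei_output (text : String) : String :=
  if text = "" then "Nuclei: no output."
  else
    let counts0 : PySem.Dict String Int := PySem.Dict.ofList (sevList.map (fun s => (s, 0)))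
    let counts := (PySem.Str.splitlines text).foldl (fun d line =>
      let lowered := PySem.Str.lower line
      d.keys.foldl (fun d2 sev =>
        if PySem.Str.isIn ("[" ++ sev ++ "]") lowered then d2.modify sev 0 (· + 1) else d2) d) counts0
    let total := counts.values.sum
    if total = 0 then "Nuclei: no findings at selected severities."
    else
      let parts := (counts.items.filter (fun p => decide (p.2 > 0))).map
        (fun p => pyCapitalize p.1 ++ "=" ++ PySem.Int.toStr p.2)
      "Nuclei Findings: " ++ PySem.Str.join ", " parts

-- ===== PORT B =====
-- the loop body of Source B's tokenizer: state = (token set so far, open bracket buffer or none)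
def pvTokStep (st : PySem.Set String × Option (List Char)) (ch : Char) :
    PySem.Set String × Option (List Char) :=
  if ch = '[' then (st.1, some [])
  else if ch = ']' then
    match st.2 with
    | some b => (PySem.Set.add st.1 (String.ofList b), none)
    | none => (st.1, none)
  else (st.1, st.2.map (fun b => b ++ [ch]))

def bracketTokens (line : String) : PySem.Set String :=
  ((PySem.Str.lower line).toList.foldl pvTokStep (PySem.Set.empty, none)).1

def summarize_nuclei_output_alt (text : String) : String :=
  if text = "" then "Nuclei: no output."
  else
    let tokenSets := (PySem.Str.splitlines text).map bracketTokens
    let counts : List (String × Int) := sevList.map (fun sev =>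
      (sev, (tokenSets.countP (fun toks => PySem.Set.contains toks sev) : Int)))
    if counts.all (fun p => p.2 == 0) then "Nuclei: no findings at selected severities."
    else
      let parts := (counts.filter (fun p => decide (p.2 > 0))).map
        (fun p => pyCapitalize p.1 ++ "=" ++ PySem.Int.toStr p.2)
      "Nuclei Findings: " ++ PySem.Str.join ", " parts

-- ===== PRECONDITION & SPEC =====
def Spec_summarize_nuclei_output (text : String) (out : String) : Prop := out = summarize_nuclei_output_alt text
instance (text : String) (out : String) : Decidable (Spec_summarize_nuclei_output text out) := by unfold Spec_summarize_nuclei_output; infer_instance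

-- ===== CLAIM (what is proved, stated in full; the proofs are below) =====
def Claim_equal_summarize_nuclei_output : Prop := ∀ (text : String), Dom_summarize_nuclei_output text → Spec_summarize_nuclei_output text (summarize_nuclei_output text)

-- ===== LEMMAS AND PROOFS =====

-- predicate: line (after lowering) contains the token for sev — A's per-line test
def pvHit (sev : String) (line : String) : Bool := PySem.Str.isIn ("[" ++ sev ++ "]") (PySem.Str.lower line)

-- a bracket-free character sequence
def pvFree (u : List Char) : Prop := ∀ c ∈ u, c ≠ '[' ∧ c ≠ ']'

-- the tokenizer invariant: w is in the final token set iff it already was, or "[w]" occurs in the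
-- remaining input, or the open buffer can be completed to w before the next bracket
theorem pvTokMem (w : List Char) (hfree : pvFree w) :
    ∀ (cs : List Char) (S : PySem.Set String) (buf : Option (List Char)),
      (String.ofList w ∈ (cs.foldl pvTokStep (S, buf)).1) ↔
        (String.ofList w ∈ S ∨ ('[' :: (w ++ [']'])) <:+: cs ∨
          (∃ b u, buf = some b ∧ w = b ++ u ∧ pvFree u ∧ (u ++ [']']) <+: cs)) := by
  intro cs
  induction cs with
  | nil =>
    intro S buf
    simp only [List.foldl_nil]
    constructor
    · intro h; exact Or.inl h
    · rintro (h | h | ⟨b, u, _, _, _, hpre⟩)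
      · exact h
      · simp at h
      · have := hpre.length_le; simp at this
  | cons c cs ih =>
    intro S buf
    simp only [List.foldl_cons]
    by_cases hc1 : c = '['
    · subst hc1
      simp only [pvTokStep, reduceIte]
      rw [ih]
      constructor
      · rintro (h | h | ⟨b, u, hb, hwu, hu, hpre⟩)
        · exact Or.inl h
        · exact Or.inr (Or.inl (List.infix_cons_iff.mpr (Or.inr h)))
        · cases hb
          simp only [List.nil_append] at hwu
          subst hwu
          exact Or.inr (Or.inl (List.infix_cons_iff.mpr (Or.inl (List.cons_prefix_cons.mpr ⟨rfl, hpre⟩))))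
      · rintro (h | h | ⟨b, u, hb, hwu, hu, hpre⟩)
        · exact Or.inl h
        · rcases List.infix_cons_iff.mp h with h | h
          · rcases List.cons_prefix_cons.mp h with ⟨-, hpre⟩
            exact Or.inr (Or.inr ⟨[], w, rfl, rfl, hfree, hpre⟩)
          · exact Or.inr (Or.inl h)
        · -- u ++ [']'] would have to start with '[' — impossible for a bracket-free u
          exfalso
          cases u with
          | nil => simp [List.cons_prefix_cons] at hpre
          | cons d u' =>
            rcases List.cons_prefix_cons.mp hpre with ⟨hd, -⟩
            exact ((hu d (by simp)).1 hd)
    · by_cases hc2 : c = ']'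
      · subst hc2
        simp only [pvTokStep, reduceIte]
        cases buf with
        | none =>
          rw [ih]
          constructor
          · rintro (h | h | ⟨b, u, hb, _⟩)
            · exact Or.inl h
            · exact Or.inr (Or.inl (List.infix_cons_iff.mpr (Or.inr h)))
            · cases hb
          · rintro (h | h | ⟨b, u, hb, _⟩)
            · exact Or.inl h
            · rcases List.infix_cons_iff.mp h with h | h
              · rcases List.cons_prefix_cons.mp h with ⟨hd, -⟩
                exact absurd hd (by decide)
              · exact Or.inr (Or.inl h)
            · cases hb
        | some b =>
          rw [ih]
          constructor
          · rintro (h | h | ⟨b', u, hb, _⟩)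
            · rcases (PySem.Set.mem_add S (String.ofList b) (String.ofList w)).mp h with h | h
              · exact Or.inl h
              · have hwb : w = b := by
                  have := congrArg String.toList h
                  simpa using this
                exact Or.inr (Or.inr ⟨b, [], rfl, by simp [hwb], by intro c hc; simp at hc,
                  by simp⟩)
            · exact Or.inr (Or.inl (List.infix_cons_iff.mpr (Or.inr h)))
            · cases hb
          · rintro (h | h | ⟨b', u, hb, hwu, hu, hpre⟩)
            · exact Or.inl ((PySem.Set.mem_add S (String.ofList b) (String.ofList w)).mpr (Or.inl h))
            · rcases List.infix_cons_iff.mp h with h | h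
              · rcases List.cons_prefix_cons.mp h with ⟨hd, -⟩
                exact absurd hd (by decide)
              · exact Or.inr (Or.inl h)
            · obtain rfl : b = b' := Option.some.inj hb
              cases u with
              | nil =>
                refine Or.inl ((PySem.Set.mem_add S (String.ofList b) (String.ofList w)).mpr
                  (Or.inr ?_))
                simp only [List.append_nil] at hwu
                rw [hwu]
              | cons d u' =>
                exfalso
                rcases List.cons_prefix_cons.mp hpre with ⟨hd, -⟩
                exact ((hu d (by simp)).2 hd)
      · -- ordinary character
        simp only [pvTokStep, if_neg hc1, if_neg hc2]
        cases buf with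
        | none =>
          simp only [Option.map_none]
          rw [ih]
          constructor
          · rintro (h | h | ⟨b, u, hb, _⟩)
            · exact Or.inl h
            · exact Or.inr (Or.inl (List.infix_cons_iff.mpr (Or.inr h)))
            · cases hb
          · rintro (h | h | ⟨b, u, hb, _⟩)
            · exact Or.inl h
            · rcases List.infix_cons_iff.mp h with h | h
              · rcases List.cons_prefix_cons.mp h with ⟨hd, -⟩
                exact absurd hd.symm hc1
              · exact Or.inr (Or.inl h)
            · cases hb
        | some b =>
          simp only [Option.map_some]
          rw [ih]
          constructor
          · rintro (h | h | ⟨b', u, hb, hwu, hu, hpre⟩)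
            · exact Or.inl h
            · exact Or.inr (Or.inl (List.infix_cons_iff.mpr (Or.inr h)))
            · obtain rfl : b ++ [c] = b' := Option.some.inj hb
              refine Or.inr (Or.inr ⟨b, c :: u, rfl, by simpa using hwu, ?_, ?_⟩)
              · intro d hd
                rcases List.mem_cons.mp hd with rfl | hd
                · exact ⟨hc1, hc2⟩
                · exact hu d hd
              · exact List.cons_prefix_cons.mpr ⟨rfl, hpre⟩
          · rintro (h | h | ⟨b', u, hb, hwu, hu, hpre⟩)
            · exact Or.inl h
            · rcases List.infix_cons_iff.mp h with h | h
              · rcases List.cons_prefix_cons.mp h with ⟨hd, -⟩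
                exact absurd hd.symm hc1
              · exact Or.inr (Or.inl h)
            · obtain rfl : b = b' := Option.some.inj hb
              cases u with
              | nil =>
                exfalso
                rcases List.cons_prefix_cons.mp hpre with ⟨hd, -⟩
                exact hc2 hd.symm
              | cons d u' =>
                rcases List.cons_prefix_cons.mp hpre with ⟨hd, hpre'⟩
                rw [hd] at hwu
                refine Or.inr (Or.inr ⟨b ++ [c], u', rfl, by simpa using hwu,
                  fun e he => hu e (by simp [he]), hpre'⟩)

-- B's per-line test equals A's per-line test, for any bracket-free nonempty severity word
theorem pvContains_eq_pvHit (sev : String) (hfree : pvFree sev.toList)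
    (line : String) :
    PySem.Set.contains (bracketTokens line) sev = pvHit sev line := by
  rw [Bool.eq_iff_iff]
  rw [PySem.Set.contains_iff]
  unfold bracketTokens pvHit
  rw [show sev = String.ofList sev.toList by simp]
  rw [pvTokMem sev.toList hfree]
  rw [PySem.Str.isIn_iff_infix]
  constructor
  · rintro (h | h | ⟨b, u, hb, _⟩)
    · simp [PySem.Set.empty] at h
    · simpa using h
    · cases hb
  · intro h
    exact Or.inr (Or.inl (by simpa using h))

-- one line-step of A's loop on a concrete 5-entry state
theorem pvStepA (line : String) (a b c h k : Int) :
    (let lowered := PySem.Str.lower line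
     (PySem.Dict.mk [("info", a), ("low", b), ("medium", c), ("high", h), ("critical", k)]).keys.foldl
       (fun d2 sev =>
         if PySem.Str.isIn ("[" ++ sev ++ "]") lowered then d2.modify sev 0 (· + 1) else d2)
       (PySem.Dict.mk [("info", a), ("low", b), ("medium", c), ("high", h), ("critical", k)]))
    = PySem.Dict.mk [("info", a + if pvHit "info" line then 1 else 0),
                     ("low", b + if pvHit "low" line then 1 else 0),
                     ("medium", c + if pvHit "medium" line then 1 else 0),
                     ("high", h + if pvHit "high" line then 1 else 0),
                     ("critical", k + if pvHit "critical" line then 1 else 0)] := by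
  simp only [PySem.Dict.keys, List.map, List.foldl, pvHit]
  split_ifs <;>
    simp [PySem.Dict.modify, PySem.Dict.insert, PySem.Dict.get?, PySem.Dict.getD, PySem.Dict.contains]

-- A's whole loop over the lines equals per-severity countP counts
theorem pvLoopA (L : List String) (a b c h k : Int) :
    L.foldl (fun d line =>
      let lowered := PySem.Str.lower line
      d.keys.foldl (fun d2 sev =>
        if PySem.Str.isIn ("[" ++ sev ++ "]") lowered then d2.modify sev 0 (· + 1) else d2) d)
      (PySem.Dict.mk [("info", a), ("low", b), ("medium", c), ("high", h), ("critical", k)])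
    = PySem.Dict.mk [("info", a + (L.countP (pvHit "info") : Int)),
                     ("low", b + (L.countP (pvHit "low") : Int)),
                     ("medium", c + (L.countP (pvHit "medium") : Int)),
                     ("high", h + (L.countP (pvHit "high") : Int)),
                     ("critical", k + (L.countP (pvHit "critical") : Int))] := by
  induction L generalizing a b c h k with
  | nil => simp
  | cons l L ih =>
    simp only [List.foldl_cons]
    rw [pvStepA, ih]
    have e : ∀ (x : Int) (p : Bool) (n : Nat),
        (x + if p then (1:Int) else 0) + (n : Int) = x + (((n + if p then 1 else 0 : Nat)) : Int) := by
      intro x p n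
      cases p
      · simp
      · simp
        omega
    simp only [List.countP_cons, e]

-- ===== VERDICT (by name: the statement is the Claim_ definition above) =====
theorem summarize_nuclei_output_spec : Claim_equal_summarize_nuclei_output := by
  intro text _
  unfold Spec_summarize_nuclei_output summarize_nuclei_output summarize_nuclei_output_alt
  by_cases ht : text = ""
  · simp [ht]
  · simp only [ht, if_false]
    have hc : (PySem.Dict.ofList (sevList.map (fun s => (s, (0:Int)))))
        = PySem.Dict.mk [("info", 0), ("low", 0), ("medium", 0), ("high", 0), ("critical", 0)] := by
      decide
    rw [hc, pvLoopA]
    simp only [zero_add, sevList, List.map, List.countP_map]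
    have hcomp : ∀ sev : String, pvFree sev.toList →
        ((fun toks => PySem.Set.contains toks sev) ∘ bracketTokens) = pvHit sev := by
      intro sev h2; funext line
      simp only [Function.comp]
      exact pvContains_eq_pvHit sev h2 line
    rw [hcomp "info" (by simp [pvFree]), hcomp "low" (by simp [pvFree]),
        hcomp "medium" (by simp [pvFree]), hcomp "high" (by simp [pvFree]),
        hcomp "critical" (by simp [pvFree])]
    generalize (List.countP (pvHit "info") (PySem.Str.splitlines text)) = n1
    generalize (List.countP (pvHit "low") (PySem.Str.splitlines text)) = n2
    generalize (List.countP (pvHit "medium") (PySem.Str.splitlines text)) = n3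
    generalize (List.countP (pvHit "high") (PySem.Str.splitlines text)) = n4
    generalize (List.countP (pvHit "critical") (PySem.Str.splitlines text)) = n5
    simp only [PySem.Dict.values, List.map, List.sum_cons, List.sum_nil,
      List.all_cons, List.all_nil, Bool.and_true, add_zero]
    by_cases hz : n1 = 0 ∧ n2 = 0 ∧ n3 = 0 ∧ n4 = 0 ∧ n5 = 0
    · obtain ⟨e1, e2, e3, e4, e5⟩ := hz
      subst e1 e2 e3 e4 e5
      norm_num
    · have hA : ¬((n1 : Int) + ((n2 : Int) + ((n3 : Int) + ((n4 : Int) + (n5 : Int)))) = 0) := by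
        omega
      have hB : ¬((((n1 : Int) == 0) && (((n2 : Int) == 0) && (((n3 : Int) == 0) &&
          (((n4 : Int) == 0) && ((n5 : Int) == 0))))) = true) := by
        simp only [beq_iff_eq, Bool.and_eq_true]
        omega
      rw [if_neg hA, if_neg hB]
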